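-- pv_equiv track=rewrite | github.com/ribbas/music-genre-nw | src/parser/cleaners.py | strip_annotations
-- ===== SOURCE A (Python) =====
-- def strip_annotations(category_values_list: list[str]) -> list:
--
--     for ix in range(len(category_values_list)):
--         category_values_list[ix] = "".join(
--             s.split("]")[-1] for s in category_values_list[ix].split("[")
--         )
--         category_values_list[ix] = "".join(
--             s.split(")")[-1] for s in category_values_list[ix].split("(")
--         )
--     return category_values_list
-- ===== SOURCE B (Python) =====
-- def _strip_pair(s, opener, closer):
--     # single-pass state machine: flush buffer on opener, discard it on closer
--     out = []
--     buf = []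
--     for ch in s:
--         if ch == opener:
--             out.extend(buf)
--             buf = []
--         elif ch == closer:
--             buf = []
--         else:
--             buf.append(ch)
--     out.extend(buf)
--     return "".join(out)
--
--
-- def strip_annotations(category_values_list: list[str]) -> list:
--     for ix in range(len(category_values_list)):
--         category_values_list[ix] = _strip_pair(
--             _strip_pair(category_values_list[ix], "[", "]"), "(", ")"
--         )
--     return category_values_list
-- ===== Notes on version B (the rewrite author's own statement) =====
-- stated objective: alternative
-- what changed: Replaces the per-string split('[')/split(']')[-1]/join double-split pipeline with a single-pass character state machine per delimiter pair (flush buffer on opener, discard it on closer), still mutating the list in place.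
import Mathlib
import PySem

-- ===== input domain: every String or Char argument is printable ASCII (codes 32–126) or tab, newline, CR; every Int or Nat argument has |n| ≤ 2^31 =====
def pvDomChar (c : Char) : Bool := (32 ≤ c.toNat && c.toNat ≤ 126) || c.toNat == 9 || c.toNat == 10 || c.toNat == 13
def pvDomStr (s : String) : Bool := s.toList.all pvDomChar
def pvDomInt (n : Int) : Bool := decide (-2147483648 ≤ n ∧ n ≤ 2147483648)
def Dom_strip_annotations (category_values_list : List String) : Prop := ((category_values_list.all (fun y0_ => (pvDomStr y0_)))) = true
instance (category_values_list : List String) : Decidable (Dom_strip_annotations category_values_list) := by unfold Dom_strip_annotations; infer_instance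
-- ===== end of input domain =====

-- Header: B replaces A's split/join double-split pipeline per string with a single-pass
-- character state machine per delimiter pair; same cost, different algorithm. A mutates
-- the list in place in Python; the equivalence proved here is about the return value.


-- ===== PORT A =====
-- '"".join(s.split(c)[-1] for s in v.split(o))' : split never returns an empty list,
-- so '[-1]' is exactly 'getLastD []' here.
def aPhase (s : List Char) (o c : Char) : List Char :=
  PySem.Chars.join []
    ((PySem.Chars.splitOn s [o]).map (fun seg => (PySem.Chars.splitOn seg [c]).getLastD []))

def strip_annotations (category_values_list : List String) : List String :=
  category_values_list.map (fun v =>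
    let v1 := String.ofList (aPhase v.toList '[' ']')
    String.ofList (aPhase v1.toList '(' ')'))

-- ===== PORT B =====
-- state machine of Source B's _strip_pair: flush buf on opener, discard buf on closer
def bScan (o c : Char) (out buf : List Char) : List Char → List Char
  | [] => out ++ buf
  | x :: xs =>
    if x = o then bScan o c (out ++ buf) [] xs
    else if x = c then bScan o c out [] xs
    else bScan o c out (buf ++ [x]) xs

def strip_annotations_alt (category_values_list : List String) : List String :=
  category_values_list.map (fun v =>
    String.ofList (bScan '(' ')' [] [] (String.toList (String.ofList (bScan '[' ']' [] [] v.toList)))))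

-- ===== PRECONDITION & SPEC =====
def Spec_strip_annotations (category_values_list : List String) (out : List String) : Prop := out = strip_annotations_alt category_values_list
instance (category_values_list : List String) (out : List String) : Decidable (Spec_strip_annotations category_values_list out) := by unfold Spec_strip_annotations; infer_instance

-- ===== CLAIM (what is proved, stated in full; the proofs are below) =====
def Claim_equal_strip_annotations : Prop := ∀ (category_values_list : List String), Dom_strip_annotations category_values_list → Spec_strip_annotations category_values_list (strip_annotations category_values_list)

-- ===== LEMMAS AND PROOFS =====

-- splitOn with a one-char separator is Mathlib's splitOnP
theorem go_single (c : Char) : ∀ (fuel : Nat) (l cur : List Char) (acc : List (List Char)), l.length < fuel →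
    PySem.Chars.splitOn.go [c] fuel l cur acc
      = acc.reverse ++ (l.splitOnP (· == c)).modifyHead (fun h => cur.reverse ++ h) := by
  intro fuel
  induction fuel with
  | zero => intro l cur acc h; omega
  | succ f ih =>
    intro l cur acc h
    cases l with
    | nil => simp [PySem.Chars.splitOn.go, List.splitOnP_nil]
    | cons x rest =>
      rw [PySem.Chars.splitOn.go.eq_def]
      by_cases hx : c = x
      · subst hx
        simp only [List.isPrefixOf, List.isPrefixOf_nil_left, Bool.and_true, beq_self_eq_true,
          if_pos rfl]
        simp only [if_true, List.length_singleton, List.drop_succ_cons, List.drop_zero]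
        rw [ih rest [] (cur.reverse :: acc) (by simpa using Nat.lt_of_succ_lt_succ h)]
        rw [List.splitOnP_cons]
        simp only [beq_self_eq_true, if_true, List.reverse_cons, List.reverse_nil,
          List.nil_append, List.append_assoc, List.singleton_append, List.modifyHead_cons]
        cases List.splitOnP (fun x => x == c) rest <;> simp
      · have hpre : [c].isPrefixOf (x :: rest) = false := by
          simp [List.isPrefixOf]; exact fun hc => absurd hc hx
        simp only [hpre, Bool.false_eq_true, if_false]
        rw [ih rest (x :: cur) acc (by simpa using Nat.lt_of_succ_lt_succ h)]
        have hne := List.splitOnP_ne_nil (· == c) rest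
        obtain ⟨hd, tl, hsp⟩ := List.exists_cons_of_ne_nil hne
        simp [List.splitOnP_cons, hsp, beq_iff_eq, Ne.symm hx]

theorem splitOn_single (l : List Char) (c : Char) :
    PySem.Chars.splitOn l [c] = l.splitOnP (· == c) := by
  rw [PySem.Chars.splitOn, go_single c (l.length + 1) l [] [] (Nat.lt_succ_self _)]
  have hne := List.splitOnP_ne_nil (· == c) l
  obtain ⟨hd, tl, hsp⟩ := List.exists_cons_of_ne_nil hne
  simp [hsp]

theorem join_nil_eq_flatten (parts : List (List Char)) :
    PySem.Chars.join [] parts = parts.flatten := by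
  induction parts with
  | nil => rfl
  | cons p ps ih =>
    cases ps with
    | nil => simp [PySem.Chars.join, List.intercalate]
    | cons q qs =>
      simp only [PySem.Chars.join, List.intercalate, List.intersperse] at ih ⊢
      simp_all

-- the text kept from one segment: everything after the last closer
def keepSeg (c : Char) (seg : List Char) : List Char :=
  (seg.splitOnP (· == c)).getLastD []

-- whether the closer occurs before the first opener (i.e. the pending buffer dies)
def Pfirst (o c : Char) : List Char → Bool
  | [] => false
  | x :: xs => if x = o then false else if x = c then true else Pfirst o c xs

def Aone (o c : Char) (l : List Char) : List Char :=
  ((l.splitOnP (· == o)).map (keepSeg c)).flatten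

theorem length_splitOnP (c : Char) (l : List Char) :
    (l.splitOnP (· == c)).length = l.count c + 1 := by
  induction l with
  | nil => simp [List.splitOnP_nil]
  | cons x xs ih =>
    by_cases hx : x = c
    · subst hx; simp [List.splitOnP_cons, List.count_cons, ih]
    · have hne := List.splitOnP_ne_nil (· == c) xs
      obtain ⟨hd, tl, hsp⟩ := List.exists_cons_of_ne_nil hne
      rw [hsp] at ih
      simp only [List.length_cons] at ih
      simp [List.splitOnP_cons, hsp, List.count_cons, hx, beq_iff_eq]
      omega

theorem keepSeg_closer (c : Char) (seg : List Char) :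
    keepSeg c (c :: seg) = keepSeg c seg := by
  unfold keepSeg
  rw [List.splitOnP_cons]
  simp only [beq_self_eq_true, if_true]
  rw [List.getLastD_cons]

theorem keepSeg_other (c x : Char) (seg : List Char) (hx : x ≠ c) :
    keepSeg c (x :: seg) = if c ∈ seg then keepSeg c seg else x :: keepSeg c seg := by
  have hne := List.splitOnP_ne_nil (· == c) seg
  obtain ⟨hd, tl, hsp⟩ := List.exists_cons_of_ne_nil hne
  have hlen := length_splitOnP c seg
  rw [hsp] at hlen
  by_cases hmem : c ∈ seg
  · have hcnt : seg.count c ≠ 0 := by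
      simpa [List.count_eq_zero] using hmem
    have htl : tl ≠ [] := by
      intro h; rw [h] at hlen; simp at hlen; omega
    obtain ⟨z, zs, hz⟩ := List.exists_cons_of_ne_nil htl
    simp [keepSeg, List.splitOnP_cons, hsp, hz, hx, hmem, List.getLastD_cons]
  · have hcnt : seg.count c = 0 := by
      simpa [List.count_eq_zero] using hmem
    have htl : tl = [] := by
      rw [hcnt] at hlen; simp at hlen
      cases tl with
      | nil => rfl
      | cons a b => simp at hlen
    subst htl
    simp [keepSeg, List.splitOnP_cons, hsp, hx, hmem]

theorem Pfirst_eq_mem_head (o c : Char) (l : List Char) :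
    Pfirst o c l = true ↔ c ∈ (l.splitOnP (· == o)).headD [] := by
  induction l with
  | nil => simp [Pfirst, List.splitOnP_nil]
  | cons x xs ih =>
    by_cases ho : x = o
    · subst ho; simp [Pfirst, List.splitOnP_cons]
    · have hne := List.splitOnP_ne_nil (· == o) xs
      obtain ⟨hd, tl, hsp⟩ := List.exists_cons_of_ne_nil hne
      rw [hsp] at ih
      by_cases hc : x = c
      · subst hc; simp [Pfirst, ho, List.splitOnP_cons, hsp]
      · simp [Pfirst, ho, hc, List.splitOnP_cons, hsp, ih, Ne.symm hc]

theorem Aone_nil (o c : Char) : Aone o c [] = [] := by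
  simp [Aone, List.splitOnP_nil, keepSeg]

theorem Aone_cons (o c x : Char) (xs : List Char) :
    Aone o c (x :: xs) =
      if x = o then Aone o c xs
      else if x = c then Aone o c xs
      else if Pfirst o c xs then Aone o c xs else x :: Aone o c xs := by
  by_cases ho : x = o
  · subst ho
    simp [Aone, List.splitOnP_cons, keepSeg, List.splitOnP_nil]
  · have hne := List.splitOnP_ne_nil (· == o) xs
    obtain ⟨hd, tl, hsp⟩ := List.exists_cons_of_ne_nil hne
    by_cases hc : x = c
    · subst hc
      simp [Aone, List.splitOnP_cons, ho, hsp, keepSeg_closer]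
    · have hPf : Pfirst o c xs = true ↔ c ∈ hd := by
        rw [Pfirst_eq_mem_head, hsp]; simp
      by_cases hmem : c ∈ hd
      · have : Pfirst o c xs = true := hPf.mpr hmem
        simp [Aone, List.splitOnP_cons, ho, hc, hsp, this, keepSeg_other c x hd hc, hmem]
      · have : Pfirst o c xs = false := by
          rw [← Bool.not_eq_true]; intro h; exact hmem (hPf.mp h)
        simp [Aone, List.splitOnP_cons, ho, hc, hsp, this, keepSeg_other c x hd hc, hmem]

theorem bScan_eq (o c : Char) (l : List Char) : ∀ (out buf : List Char),
    bScan o c out buf l = out ++ (if Pfirst o c l then [] else buf) ++ Aone o c l := by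
  induction l with
  | nil => intro out buf; simp [bScan, Pfirst, Aone_nil]
  | cons x xs ih =>
    intro out buf
    rw [bScan, Aone_cons]
    by_cases ho : x = o
    · subst ho
      rw [if_pos rfl, ih]
      simp [Pfirst]
    · by_cases hc : x = c
      · subst hc
        rw [if_neg ho, if_pos rfl, ih]
        simp [Pfirst, ho]
      · rw [if_neg ho, if_neg hc, ih]
        simp only [Pfirst, if_neg ho, if_neg hc]
        by_cases hp : Pfirst o c xs
        · simp [hp]
        · simp [hp]

theorem phase_eq (s : List Char) (o c : Char) :
    bScan o c [] [] s = aPhase s o c := by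
  rw [bScan_eq]
  have : aPhase s o c = Aone o c s := by
    unfold aPhase Aone keepSeg
    rw [join_nil_eq_flatten]
    simp only [splitOn_single]
  rw [this]
  simp

-- ===== VERDICT (by name: the statement is the Claim_ definition above) =====
theorem strip_annotations_spec : Claim_equal_strip_annotations := by
  intro l _
  unfold Spec_strip_annotations strip_annotations strip_annotations_alt
  apply List.map_congr_left
  intro v _
  simp only [String.toList_ofList, phase_eq]
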